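-- pv_equiv track=rewrite | github.com/kukazmontero/Route-View | route_view.py | calculate_all_routes_with_nulls
-- ===== SOURCE A (Python) =====
-- def calculate_all_routes_with_nulls(routes, connections):
--     all_routes = []
--
--     def dfs_with_nulls(current_route, ttl_index):
--         if ttl_index >= len(routes):
--             all_routes.append(current_route.copy())
--             return
--
--         current_hops = routes[ttl_index]["hops"]
--         if not current_hops:
--             current_route.append(None)
--             dfs_with_nulls(current_route, ttl_index + 1)
--             current_route.pop()
--         else:
--             for next_hop in current_hops:
--                 current_route.append(next_hop)
--                 dfs_with_nulls(current_route, ttl_index + 1)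
--                 current_route.pop()
--
--     for start_node in routes[0]["hops"]:
--         dfs_with_nulls([start_node], 1)
--
--     return all_routes
-- ===== SOURCE B (Python) =====
-- def calculate_all_routes_with_nulls(routes, connections):
--     # per-level choice table: level 0 verbatim, later levels substitute [None] for empty hops
--     levels = [routes[0]["hops"]] + [r["hops"] or [None] for r in routes[1:]]
--     combos = [[]]
--     for level in reversed(levels):
--         combos = [[x] + c for x in level for c in combos]
--     return combos
-- ===== Notes on version B (the rewrite author's own statement) =====
-- stated objective: simpler
-- what changed: Replaces the recursive DFS with a mutable path and backtracking (append/pop) by a precomputed per-level choice table (level 0 verbatim, later empty levels become [None]) whose Cartesian product is built back-to-front with a fold.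
-- outside the precondition, e.g. on calculate_all_routes_with_nulls([{'hops': []}, {}], []): A returns [], B raises KeyError
import Mathlib
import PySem

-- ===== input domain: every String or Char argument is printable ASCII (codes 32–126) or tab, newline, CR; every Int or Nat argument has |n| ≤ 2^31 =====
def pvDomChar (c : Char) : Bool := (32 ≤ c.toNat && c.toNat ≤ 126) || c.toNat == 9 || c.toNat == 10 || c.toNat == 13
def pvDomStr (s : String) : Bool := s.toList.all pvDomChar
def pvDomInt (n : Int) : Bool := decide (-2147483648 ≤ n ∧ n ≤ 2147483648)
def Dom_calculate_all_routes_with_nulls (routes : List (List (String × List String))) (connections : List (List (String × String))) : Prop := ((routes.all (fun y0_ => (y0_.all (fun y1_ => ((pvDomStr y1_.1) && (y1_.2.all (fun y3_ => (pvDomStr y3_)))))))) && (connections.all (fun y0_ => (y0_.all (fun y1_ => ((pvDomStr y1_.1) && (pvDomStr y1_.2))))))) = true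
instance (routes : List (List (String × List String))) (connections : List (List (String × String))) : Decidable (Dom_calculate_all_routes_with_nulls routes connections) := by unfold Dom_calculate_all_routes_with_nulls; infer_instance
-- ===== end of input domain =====

-- B replaces A's backtracking DFS (mutable path, append/pop) by a precomputed per-level
-- choice table whose Cartesian product is folded back-to-front; same values, same order.


-- ===== PORT A =====
-- r["hops"]: first-match lookup in the association list; the default [] is never used
-- inside Pre_ (which requires every route dict to carry the "hops" key).
def pvHops (r : List (String × List String)) : List String :=
  (List.lookup "hops" r).getD []

-- the nested 'dfs_with_nulls': append/recurse/pop becomes passing the extended path down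
def pvDfs (routes : List (List (String × List String))) (cur : List (Option String)) (ttl : Nat) : List (List (Option String)) :=
  if _h : routes.length ≤ ttl then [cur]
  else
    let hops := pvHops (routes.getD ttl [])   -- routes[ttl_index]["hops"]; in range here
    if hops.isEmpty then
      pvDfs routes (cur ++ [none]) (ttl + 1)
    else
      hops.flatMap (fun h => pvDfs routes (cur ++ [some h]) (ttl + 1))
termination_by routes.length - ttl
decreasing_by all_goals omega

def calculate_all_routes_with_nulls (routes : List (List (String × List String))) (connections : List (List (String × String))) : List (List (Option String)) :=
  -- routes[0]: Pre_ excludes routes = [] (IndexError), so headD's default is never used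
  (pvHops (routes.headD [])).flatMap (fun s => pvDfs routes [some s] 1)

-- ===== PORT B =====
-- r["hops"] or [None]
def pvLevel (r : List (String × List String)) : List (Option String) :=
  let h := pvHops r
  if h.isEmpty then [none] else h.map some

def calculate_all_routes_with_nulls_alt (routes : List (List (String × List String))) (connections : List (List (String × String))) : List (List (Option String)) :=
  let levels : List (List (Option String)) :=
    (pvHops (routes.headD [])).map some :: (routes.drop 1).map pvLevel
  levels.reverse.foldl (fun combos level => level.flatMap (fun x => combos.map (fun c => x :: c))) [[]]

-- ===== PRECONDITION & SPEC =====
-- Pre_ excludes routes = [] (A raises IndexError on routes[0]) and routes lists where some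
-- level dict lacks the "hops" key (A raises KeyError when that level is reached — and where
-- A's first level is empty so the DFS never reaches the bad level, B itself raises KeyError
-- while building the table, so those inputs are excluded too).
def Pre_calculate_all_routes_with_nulls (routes : List (List (String × List String))) (connections : List (List (String × String))) : Prop :=
  routes ≠ [] ∧ ∀ r ∈ routes, (List.lookup "hops" r).isSome = true
instance (routes : List (List (String × List String))) (connections : List (List (String × String))) : Decidable (Pre_calculate_all_routes_with_nulls routes connections) := by unfold Pre_calculate_all_routes_with_nulls; infer_instance

def pvWitness_calculate_all_routes_with_nulls : (List (List (String × List String))) × (List (List (String × String))) :=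
  ([[("hops", ["a", "b"])], [("hops", [])], [("hops", ["c"])]], [])

def Spec_calculate_all_routes_with_nulls (routes : List (List (String × List String))) (connections : List (List (String × String))) (out : List (List (Option String))) : Prop := out = calculate_all_routes_with_nulls_alt routes connections
instance (routes : List (List (String × List String))) (connections : List (List (String × String))) (out : List (List (Option String))) : Decidable (Spec_calculate_all_routes_with_nulls routes connections out) := by unfold Spec_calculate_all_routes_with_nulls; infer_instance

-- ===== CLAIM (what is proved, stated in full; the proofs are below) =====
def Claim_equal_calculate_all_routes_with_nulls : Prop := ∀ (routes : List (List (String × List String))) (connections : List (List (String × String))), Dom_calculate_all_routes_with_nulls routes connections → Pre_calculate_all_routes_with_nulls routes connections → Spec_calculate_all_routes_with_nulls routes connections (calculate_all_routes_with_nulls routes connections)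

-- ===== LEMMAS AND PROOFS =====

-- one product step of B's fold, as a standalone function for the invariant
def pvStep (level : List (Option String)) (acc : List (List (Option String))) : List (List (Option String)) :=
  level.flatMap (fun x => acc.map (fun c => x :: c))

-- A's DFS from level ttl computes the product of B's table for the remaining levels,
-- prefixed by the current path.
lemma pvDfs_eq (routes : List (List (String × List String))) (cur : List (Option String)) (ttl : Nat) :
    pvDfs routes cur ttl = (((routes.drop ttl).map pvLevel).foldr pvStep [[]]).map (cur ++ ·) := by
  generalize hn : routes.length - ttl = n
  induction n generalizing cur ttl with
  | zero =>
    rw [pvDfs, dif_pos (by omega : routes.length ≤ ttl)]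
    simp [List.drop_eq_nil_of_le (by omega : routes.length ≤ ttl)]
  | succ n ih =>
    have hlt : ttl < routes.length := by omega
    rw [pvDfs]
    rw [List.drop_eq_getElem_cons hlt]
    simp only [List.map_cons, List.foldr_cons, dif_neg (by omega : ¬ routes.length ≤ ttl)]
    have hget : routes.getD ttl [] = routes[ttl] := List.getD_eq_getElem routes [] hlt
    rw [hget, pvLevel]
    by_cases he : (pvHops routes[ttl]).isEmpty
    · simp only [he, if_pos, ih (cur ++ [none]) (ttl + 1) (by omega), pvStep]
      simp [List.map_map, Function.comp]
    · simp only [he, if_neg, Bool.false_eq_true, not_false_iff, pvStep]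
      simp only [List.flatMap_map, List.map_flatMap, List.map_map]
      refine List.flatMap_congr ?_ 
      intro h hmem
      rw [ih (cur ++ [some h]) (ttl + 1) (by omega)]
      simp [Function.comp]

-- ===== VERDICT (by name: the statement is the Claim_ definition above) =====
theorem calculate_all_routes_with_nulls_spec : Claim_equal_calculate_all_routes_with_nulls := by
  intro routes connections _hDom _hPre
  unfold Spec_calculate_all_routes_with_nulls
  unfold calculate_all_routes_with_nulls calculate_all_routes_with_nulls_alt
  rw [List.foldl_reverse]
  simp only [List.foldr_cons, List.flatMap_map]
  refine List.flatMap_congr ?_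
  intro s _
  rw [pvDfs_eq]
  simp only [List.singleton_append]
  rw [show (fun (x : List (Option String)) (y : List (List (Option String))) => List.flatMap (fun x => List.map (fun c => x :: c) y) x) = pvStep from rfl]
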